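-- pv_equiv track=rewrite | github.com/Aarononomous/ptr | ptr.py | untag_sentence
-- ===== SOURCE A (Python) =====
-- def untag_sentence(tagged_sentence):
--     """Get back the original text of a sentence."""
--     leading_tags = set(
--         ['(', '$', '``'])  # don't need a space after, but do before
--     following_tags = set([')', ',', '.', ':', "''", 'POS']
--                          )  # need a space after, but not before
--     sentence = ''
--     no_sp = False
--     for w, pos in tagged_sentence:
--         if pos != '-NONE-':
--             if pos in following_tags or w in {'%'}:
--                 sentence += w
--             else:
--                 sentence += ('' if no_sp else ' ') + w
--             no_sp = pos in leading_tags
--     return sentence[1:]  # ignore leading space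
-- ===== SOURCE B (Python) =====
-- def untag_sentence(tagged_sentence):
--     """Get back the original text of a sentence."""
--     leading_tags = {'(', '$', '``'}
--     following_tags = {')', ',', '.', ':', "''", 'POS'}
--
--     kept = [wp for wp in tagged_sentence if wp[1] != '-NONE-']
--
--     def sep(prev, cur):
--         w, pos = cur
--         if pos in following_tags or w == '%' or (prev is not None and prev[1] in leading_tags):
--             return ''
--         return ' '
--
--     pieces = [sep(prev, cur) + cur[0]
--               for prev, cur in zip([None] + kept, kept)]
--     return ''.join(pieces)[1:]
-- ===== Notes on version B (the rewrite author's own statement) =====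
-- stated objective: alternative
-- what changed: Replaces A's single fold carrying a no_sp flag with a filter pass over the tokens, a separator computed per adjacent pair via zip with the shifted list, and one join; same O(n) cost.
import Mathlib
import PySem

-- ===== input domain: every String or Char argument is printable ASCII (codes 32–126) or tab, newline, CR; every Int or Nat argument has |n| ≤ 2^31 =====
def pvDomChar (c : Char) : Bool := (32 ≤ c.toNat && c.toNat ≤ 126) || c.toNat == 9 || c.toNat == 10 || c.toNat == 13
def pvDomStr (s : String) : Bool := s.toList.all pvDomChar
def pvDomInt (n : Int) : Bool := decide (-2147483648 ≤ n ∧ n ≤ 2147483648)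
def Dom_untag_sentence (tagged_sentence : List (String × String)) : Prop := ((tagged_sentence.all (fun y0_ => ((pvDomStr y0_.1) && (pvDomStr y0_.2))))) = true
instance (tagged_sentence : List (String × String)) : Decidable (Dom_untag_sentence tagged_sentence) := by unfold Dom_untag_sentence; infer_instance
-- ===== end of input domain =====

-- B rebuilds the text by a filter pass plus an adjacent-pair separator computation (zip with the
-- shifted list) and a single join, replacing A's carried `no_sp` accumulator; objective: alternative.

-- ===== PORT A =====
def untag_sentence (tagged_sentence : List (String × String)) : String :=
  let leading_tags : PySem.Set String := PySem.Set.ofList ["(", "$", "``"]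
  let following_tags : PySem.Set String := PySem.Set.ofList [")", ",", ".", ":", "''", "POS"]
  let r := tagged_sentence.foldl (fun (st : String × Bool) wp =>
    let w := wp.1
    let pos := wp.2
    if pos != "-NONE-" then
      let sentence :=
        if PySem.Set.contains following_tags pos || PySem.Set.contains (PySem.Set.ofList ["%"]) w
        then st.1 ++ w
        else st.1 ++ ((if st.2 then "" else " ") ++ w)
      (sentence, PySem.Set.contains leading_tags pos)
    else st) ("", false)
  PySem.Str.slice r.1 (some 1) none

-- ===== PORT B =====
def leadTagsB : List String := ["(", "$", "``"]
def folTagsB : List String := [")", ",", ".", ":", "''", "POS"]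

def sepB (prev : Option (String × String)) (cur : String × String) : String :=
  if folTagsB.contains cur.2 || cur.1 == "%" ||
     (match prev with | some p => leadTagsB.contains p.2 | none => false)
  then "" else " "

def untag_sentence_alt (tagged_sentence : List (String × String)) : String :=
  let kept := tagged_sentence.filter (fun wp => wp.2 != "-NONE-")
  let pieces := (List.zip (none :: kept.map some) kept).map (fun pc => sepB pc.1 pc.2 ++ pc.2.1)
  PySem.Str.slice (PySem.Str.join "" pieces) (some 1) none

-- ===== PRECONDITION & SPEC =====
def Spec_untag_sentence (tagged_sentence : List (String × String)) (out : String) : Prop := out = untag_sentence_alt tagged_sentence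
instance (tagged_sentence : List (String × String)) (out : String) : Decidable (Spec_untag_sentence tagged_sentence out) := by unfold Spec_untag_sentence; infer_instance

-- ===== CLAIM (what is proved, stated in full; the proofs are below) =====
def Claim_equal_untag_sentence : Prop := ∀ (tagged_sentence : List (String × String)), Dom_untag_sentence tagged_sentence → Spec_untag_sentence tagged_sentence (untag_sentence tagged_sentence)

-- ===== LEMMAS AND PROOFS =====

-- B's piece list starting from an arbitrary "previous kept token" (proof helper).
def gB (prev : Option (String × String)) (l : List (String × String)) : String :=
  PySem.Str.join "" ((List.zip (prev :: l.map some) l).map (fun pc => sepB pc.1 pc.2 ++ pc.2.1))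

-- the value A's `no_sp` flag has after processing the kept token `prev` (none = before the first)
def prevFlag (prev : Option (String × String)) : Bool :=
  match prev with | some p => leadTagsB.contains p.2 | none => false

lemma string_ext {a b : String} (h : a.toList = b.toList) : a = b := by
  simpa using congrArg String.ofList h

lemma join_empty_cons (a : List Char) (rest : List (List Char)) :
    PySem.Chars.join [] (a :: rest) = a ++ PySem.Chars.join [] rest := by
  cases rest with
  | nil => simp [PySem.Chars.join_singleton, PySem.Chars.join_nil]
  | cons b bs => simp [PySem.Chars.join_cons_cons]

lemma gB_nil (prev : Option (String × String)) : gB prev [] = "" := by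
  simp [gB, PySem.Str.join]

lemma toList_gB_cons (prev : Option (String × String)) (x : String × String)
    (l : List (String × String)) :
    (gB prev (x :: l)).toList
      = (sepB prev x).toList ++ x.1.toList ++ (gB (some x) l).toList := by
  simp only [gB, PySem.Str.toList_join, List.map_cons, List.zip_cons_cons]
  rw [show ("" : String).toList = [] from rfl, join_empty_cons]
  simp

lemma sepB_of_cond (prev : Option (String × String)) (x : String × String)
    (hcp : x.2 ∈ folTagsB ∨ x.1 = "%") : sepB prev x = "" := by
  rcases hcp with h | h
  · simp [sepB, h]
  · simp [sepB, h]

lemma sepB_of_not_cond (prev : Option (String × String)) (x : String × String)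
    (hcp : ¬(x.2 ∈ folTagsB ∨ x.1 = "%")) :
    sepB prev x = (if prevFlag prev = true then "" else " ") := by
  push Not at hcp
  cases prev with
  | none => simp [sepB, prevFlag, hcp.1, hcp.2]
  | some p => cases h : leadTagsB.contains p.2 <;> simp [sepB, prevFlag, hcp.1, hcp.2]

-- the fold of A equals the prefix plus B's pieces over the filtered rest (char-list level)
lemma foldA_eq (ts : List (String × String)) (s : String) (prev : Option (String × String)) :
    ((ts.foldl (fun (st : String × Bool) wp =>
      let w := wp.1
      let pos := wp.2
      if pos != "-NONE-" then
        let sentence :=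
          if PySem.Set.contains (PySem.Set.ofList [")", ",", ".", ":", "''", "POS"]) pos
              || PySem.Set.contains (PySem.Set.ofList ["%"]) w
          then st.1 ++ w
          else st.1 ++ ((if st.2 then "" else " ") ++ w)
        (sentence, PySem.Set.contains (PySem.Set.ofList ["(", "$", "``"]) pos)
      else st)
      (s, prevFlag prev)).1).toList
    = s.toList ++ (gB prev (ts.filter (fun wp => wp.2 != "-NONE-"))).toList := by
  induction ts generalizing s prev with
  | nil => simp [gB_nil]
  | cons x ts ih =>
      by_cases hk : x.2 = "-NONE-"
      · have h' : (x.2 != "-NONE-") = false := by simp [hk]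
        simp only [List.foldl_cons, List.filter_cons, h', Bool.false_eq_true, if_false]
        exact ih s prev
      · have h' : (x.2 != "-NONE-") = true := by simp [hk]
        have hflag : PySem.Set.contains (PySem.Set.ofList ["(", "$", "``"]) x.2
            = prevFlag (some x) := by
          rw [Bool.eq_iff_iff]
          simp [prevFlag, leadTagsB, PySem.Set.ofList]
        have hcondA : ((PySem.Set.contains (PySem.Set.ofList [")", ",", ".", ":", "''", "POS"]) x.2
              || PySem.Set.contains (PySem.Set.ofList ["%"]) x.1) = true)
            ↔ (x.2 ∈ folTagsB ∨ x.1 = "%") := by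
          simp [folTagsB, PySem.Set.ofList]
        simp only [List.foldl_cons, List.filter_cons, h', if_true]
        rw [hflag, ih _ (some x), toList_gB_cons]
        by_cases hcp : x.2 ∈ folTagsB ∨ x.1 = "%"
        · rw [if_pos (hcondA.mpr hcp), sepB_of_cond prev x hcp]
          simp
        · rw [if_neg (fun h => hcp (hcondA.mp h)), sepB_of_not_cond prev x hcp]
          cases hpf : prevFlag prev <;> simp

-- ===== VERDICT (by name: the statement is the Claim_ definition above) =====
theorem untag_sentence_spec : Claim_equal_untag_sentence := by
  intro ts _
  unfold Spec_untag_sentence untag_sentence untag_sentence_alt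
  dsimp only
  have hg : PySem.Str.join "" (((List.zip ((none : Option (String × String)) ::
      (ts.filter (fun wp => wp.2 != "-NONE-")).map some) (ts.filter (fun wp => wp.2 != "-NONE-"))).map
      (fun pc => sepB pc.1 pc.2 ++ pc.2.1))) = gB none (ts.filter (fun wp => wp.2 != "-NONE-")) := rfl
  have h := foldA_eq ts "" none
  rw [show prevFlag none = false from rfl] at h
  rw [show ("" : String).toList = [] from rfl, List.nil_append] at h
  rw [hg, string_ext h]
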